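-- pv_equiv track=rewrite | github.com/pythonercbq123/leetcode | 2023-02-20 ~ 2023-02-26/permutationSum.py | get_max_area
-- ===== SOURCE A (Python) =====
-- from collections import deque
--
-- def get_max_area(visited, grid, row, col):
--     q = deque()
--     q.append((row, col))
--     visited[row][col] = 1
--     dxy = [(0, -1), (0, 1), (1, 0), (-1, 0)]
--     area = 0
--     while q:
--         r, c = q.popleft()
--         area += 1
--         for dx, dy in dxy:
--             x = r + dx
--             y = c + dy
--             if 0 <= x < len(grid) and 0 <= y < len(grid[0]) and grid[x][y] == 1 and visited[x][y] == 0: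
--                 q.append((x, y))
--                 visited[x][y] = 1
--     return area
-- ===== SOURCE B (Python) =====
-- # Fixpoint label propagation instead of a BFS worklist: sweep the whole grid
-- # repeatedly, marking any unvisited 1-cell adjacent to an already-marked cell,
-- # until a full sweep changes nothing; the answer is the size of the marked set.
-- # Mutates `visited` to the same final state as the original.
-- def get_max_area(visited, grid, row, col):
--     visited[row][col] = 1
--     rows = len(grid)
--     cols = len(grid[0]) if grid else 0
--     marked = {(row, col)}
--     changed = True
--     while changed:
--         changed = False
--         for x in range(rows):
--             for y in range(cols):
--                 if grid[x][y] == 1 and visited[x][y] == 0 and (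
--                         (x - 1, y) in marked or (x + 1, y) in marked
--                         or (x, y - 1) in marked or (x, y + 1) in marked):
--                     visited[x][y] = 1
--                     marked.add((x, y))
--                     changed = True
--     return len(marked)
-- ===== Notes on version B (the rewrite author's own statement) =====
-- stated objective: alternative
-- what changed: Replaces the BFS queue/worklist traversal by a worklist-free fixpoint label propagation: repeated full-grid sweeps mark any unvisited 1-cell adjacent to an already-marked cell until a sweep changes nothing, and the answer is the size of the marked set instead of a pop counter.
-- outside the precondition, e.g. on get_max_area([[0, 0], [0]], [[1, 0], [0]], 0, 0): A returns 1, B raises IndexError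
import Mathlib
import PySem

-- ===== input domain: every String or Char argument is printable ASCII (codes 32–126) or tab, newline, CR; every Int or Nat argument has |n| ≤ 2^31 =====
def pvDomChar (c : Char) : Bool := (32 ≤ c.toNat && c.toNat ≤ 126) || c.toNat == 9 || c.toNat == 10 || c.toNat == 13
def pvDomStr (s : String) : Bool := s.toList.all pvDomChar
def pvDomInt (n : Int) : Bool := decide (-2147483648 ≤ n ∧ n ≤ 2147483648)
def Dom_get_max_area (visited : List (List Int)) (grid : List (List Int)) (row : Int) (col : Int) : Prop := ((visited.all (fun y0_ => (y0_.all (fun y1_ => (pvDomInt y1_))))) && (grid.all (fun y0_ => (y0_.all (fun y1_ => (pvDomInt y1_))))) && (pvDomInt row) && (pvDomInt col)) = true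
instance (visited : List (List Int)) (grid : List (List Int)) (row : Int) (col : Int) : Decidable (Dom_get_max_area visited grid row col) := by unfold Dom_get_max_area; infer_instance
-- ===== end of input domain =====

-- B replaces the BFS queue traversal by a worklist-free fixpoint label propagation (whole-grid
-- sweeps until no change, answer = size of the marked set); same return value and same final
-- mutation of `visited` in Python — the Lean equivalence is about the return value.

-- ===== PORT A =====
-- visited[x][y]  (total form; exact under Pre_, where every performed access is in range)
def vget2 (v : List (List Int)) (x y : Int) : Int :=
  PySem.List.pyGetD (PySem.List.pyGetD v x []) y 0

-- visited[x][y] = a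
def vset2 (v : List (List Int)) (x y : Int) (a : Int) : List (List Int) :=
  PySem.List.pySetD v x (PySem.List.pySetD (PySem.List.pyGetD v x []) y a)

-- number of 0 entries of `visited`; only used as fuel for the (in Python unfueled) while loop:
-- each loop iteration past the first marks at least one 0 cell, so `zeros2 + 1` iterations suffice.
def zeros2 (v : List (List Int)) : Nat := (v.map (fun r => r.count 0)).sum

def dxyA : List (Int × Int) := [(0, -1), (0, 1), (1, 0), (-1, 0)]

-- body of A's `for dx, dy in dxy` loop, state = (queue, visited)
def bfsStep (grid : List (List Int)) (r c : Int) (s : List (Int × Int) × List (List Int))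
    (d : Int × Int) : List (Int × Int) × List (List Int) :=
  let x := r + d.1
  let y := c + d.2
  -- `len(grid[0])` is only evaluated when 0 ≤ x < len(grid), i.e. grid ≠ []; headD is exact there
  if 0 ≤ x ∧ x < (grid.length : Int) ∧ 0 ≤ y ∧ y < ((grid.headD []).length : Int) ∧
      vget2 grid x y = 1 ∧ vget2 s.2 x y = 0 then
    (s.1 ++ [(x, y)], vset2 s.2 x y 1)
  else s

-- A's `while q` loop; the queue is a list popped at the head, appended at the tail
def bfsLoop (grid : List (List Int)) : Nat → List (Int × Int) → List (List Int) → Int → Int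
  | _, [], _, area => area
  | 0, _ :: _, _, area => area
  | fuel + 1, p :: rest, visited, area =>
    let s := dxyA.foldl (bfsStep grid p.1 p.2) (rest, visited)
    bfsLoop grid fuel s.1 s.2 (area + 1)

def get_max_area (visited : List (List Int)) (grid : List (List Int)) (row : Int) (col : Int) : Int :=
  let visited1 := vset2 visited row col 1
  bfsLoop grid (zeros2 visited1 + 1) [(row, col)] visited1 0

-- ===== PORT B =====
-- body of B's innermost `if`: state = (visited, marked, changed)
def cellB (grid : List (List Int)) (x y : Int)
    (st : List (List Int) × List (Int × Int) × Bool) :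
    List (List Int) × List (Int × Int) × Bool :=
  if vget2 grid x y = 1 ∧ vget2 st.1 x y = 0 ∧
      ((x - 1, y) ∈ st.2.1 ∨ (x + 1, y) ∈ st.2.1 ∨ (x, y - 1) ∈ st.2.1 ∨ (x, y + 1) ∈ st.2.1) then
    (vset2 st.1 x y 1, PySem.Set.add st.2.1 (x, y), true)
  else st

-- B's nested `for x in range(rows): for y in range(cols):` sweep
def sweepB (grid : List (List Int)) (rows cols : Nat)
    (st : List (List Int) × List (Int × Int) × Bool) :
    List (List Int) × List (Int × Int) × Bool :=
  (List.range rows).foldl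
    (fun st1 x => (List.range cols).foldl (fun st2 y => cellB grid (x : Int) (y : Int) st2) st1) st

-- B's `while changed` loop; fuel: every pass but the last marks at least one of the
-- rows*cols cells, so rows*cols+1 passes suffice (in Python the loop is unfueled).
def fixB (grid : List (List Int)) (rows cols : Nat) :
    Nat → List (List Int) → List (Int × Int) → Int
  | 0, _, marked => (marked.length : Int)
  | fuel + 1, v, marked =>
    let st := sweepB grid rows cols (v, marked, false)
    if st.2.2 then fixB grid rows cols fuel st.1 st.2.1 else (st.2.1.length : Int)

def get_max_area_alt (visited : List (List Int)) (grid : List (List Int)) (row : Int) (col : Int) : Int :=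
  let visited1 := vset2 visited row col 1
  let rows : Nat := grid.length
  let cols : Nat := if grid.isEmpty then 0 else (grid.headD []).length
  fixB grid rows cols (rows * cols + 1) visited1 (PySem.Set.ofList [(row, col)])

-- ===== PRECONDITION & SPEC =====
-- Pre_ excludes exactly the inputs on which an access can raise IndexError: the start index must be
-- a valid (Python, possibly negative) index into `visited`, and every row the bounds check can reach
-- must exist (grid and visited rows covering len(grid[0]) columns, visited covering grid's rows).
-- On ragged inputs whether A raises depends on which cells the search happens to reach, not on the
-- input shape alone, so all ragged inputs are excluded — including some where A returns normally.
def Pre_get_max_area (visited : List (List Int)) (grid : List (List Int)) (row : Int) (col : Int) : Prop :=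
  (∀ i : Nat, i < grid.length → (grid.headD []).length ≤ (grid.getD i []).length) ∧
  grid.length ≤ visited.length ∧
  (∀ i : Nat, i < grid.length → (grid.headD []).length ≤ (visited.getD i []).length) ∧
  PySem.Raise.InRange visited.length row ∧
  PySem.Raise.InRange (PySem.List.pyGetD visited row []).length col
instance (visited : List (List Int)) (grid : List (List Int)) (row : Int) (col : Int) : Decidable (Pre_get_max_area visited grid row col) := by unfold Pre_get_max_area; infer_instance

def pvWitness_get_max_area : List (List Int) × List (List Int) × Int × Int :=
  ([[0, 0], [0, 0]], [[1, 1], [0, 1]], 0, 0)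

def Spec_get_max_area (visited : List (List Int)) (grid : List (List Int)) (row : Int) (col : Int) (out : Int) : Prop := out = get_max_area_alt visited grid row col
instance (visited : List (List Int)) (grid : List (List Int)) (row : Int) (col : Int) (out : Int) : Decidable (Spec_get_max_area visited grid row col out) := by unfold Spec_get_max_area; infer_instance

-- ===== CLAIM (what is proved, stated in full; the proofs are below) =====
def Claim_equal_get_max_area : Prop := ∀ (visited : List (List Int)) (grid : List (List Int)) (row : Int) (col : Int), Dom_get_max_area visited grid row col → Pre_get_max_area visited grid row col → Spec_get_max_area visited grid row col (get_max_area visited grid row col)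

-- ===== LEMMAS AND PROOFS =====

-- in-bounds cell of the grid rectangle
def inb (grid : List (List Int)) (q : Int × Int) : Prop :=
  0 ≤ q.1 ∧ q.1 < (grid.length : Int) ∧ 0 ≤ q.2 ∧ q.2 < ((grid.headD []).length : Int)

-- eligible w.r.t. the ORIGINAL visited (after the start mark): a cell either algorithm may mark
def elig (grid v0 : List (List Int)) (q : Int × Int) : Prop :=
  inb grid q ∧ vget2 grid q.1 q.2 = 1 ∧ vget2 v0 q.1 q.2 = 0

-- 4-neighbourhood
def adj (p q : Int × Int) : Prop :=
  (q.1 = p.1 ∧ (q.2 = p.2 - 1 ∨ q.2 = p.2 + 1)) ∨ (q.2 = p.2 ∧ (q.1 = p.1 - 1 ∨ q.1 = p.1 + 1))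

-- cells both algorithms mark: start, plus closure under eligible adjacency
inductive Reach (grid v0 : List (List Int)) (s0 : Int × Int) : (Int × Int) → Prop
  | base : Reach grid v0 s0 s0
  | step {p q : Int × Int} : Reach grid v0 s0 p → adj p q → elig grid v0 q → Reach grid v0 s0 q

-- shape invariant: visited covers every grid row to len(grid[0]) columns
def Sh (grid v : List (List Int)) : Prop :=
  grid.length ≤ v.length ∧
  ∀ i : Nat, i < grid.length → (grid.headD []).length ≤ (v.getD i []).length

-- joint invariant of a marked list M and the current visited v
def Core (grid v0 : List (List Int)) (s0 : Int × Int) (M : List (Int × Int))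
    (v : List (List Int)) : Prop :=
  M.Nodup ∧ s0 ∈ M ∧ (∀ q ∈ M, q = s0 ∨ elig grid v0 q) ∧ (∀ q ∈ M, Reach grid v0 s0 q) ∧
  Sh grid v ∧
  (∀ q : Int × Int, inb grid q → q ∉ M → vget2 v q.1 q.2 = vget2 v0 q.1 q.2) ∧
  (∀ q ∈ M, inb grid q → vget2 v q.1 q.2 = 1)

-- a closed Core list is exactly the reach set
def IsClo (grid v0 : List (List Int)) (s0 : Int × Int) (M : List (Int × Int)) : Prop :=
  M.Nodup ∧ ∀ q : Int × Int, q ∈ M ↔ Reach grid v0 s0 q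


-- ---- reused low-level index/set lemmas ----
lemma inRange_norm {α : Type} (xs : List α) (i : Int) (h : PySem.Raise.InRange xs.length i) :
    ∃ j : Nat, j < xs.length ∧ (∀ v : α, PySem.List.pySetD xs i v = xs.set j v) ∧
      (∀ d : α, PySem.List.pyGetD xs i d = xs.getD j d) := by
  obtain ⟨h1, h2⟩ := h
  by_cases hi : 0 ≤ i
  · refine ⟨i.toNat, by omega, fun v => ?_, fun d => ?_⟩
    · simp [PySem.List.pySetD, PySem.List.pySet?, PySem.List.pyIdx?, hi, h2]
    · simp [PySem.List.pyGetD, PySem.List.pyGet?, PySem.List.pyIdx?, hi, h2,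
        List.getD_eq_getElem?_getD]
  · refine ⟨xs.length - (-i).toNat, by omega, fun v => ?_, fun d => ?_⟩
    · simp [PySem.List.pySetD, PySem.List.pySet?, PySem.List.pyIdx?, hi, h1]
    · simp [PySem.List.pyGetD, PySem.List.pyGet?, PySem.List.pyIdx?, hi, h1,
        List.getD_eq_getElem?_getD]

lemma getD_set_self {α : Type} (xs : List α) (n : Nat) (a d : α) (h : n < xs.length) :
    (xs.set n a).getD n d = a := by
  simp [List.getD_eq_getElem?_getD, h]

lemma getD_set_ne {α : Type} (xs : List α) (n i : Nat) (a d : α) (h : i ≠ n) :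
    (xs.set n a).getD i d = xs.getD i d := by
  simp [List.getD_eq_getElem?_getD, List.getElem?_set]
  rw [if_neg (Ne.symm h)]

lemma count_set_zero (l : List Int) : ∀ n : Nat, n < l.length → l.getD n 0 = 0 →
    (l.set n (1 : Int)).count 0 + 1 = l.count 0 := by
  induction l with
  | nil => intro n h; simp at h
  | cons a l ih =>
    intro n h h0
    cases n with
    | zero => simp_all
    | succ n =>
      simp only [List.set_cons_succ, List.count_cons]
      have := ih n (by simpa using h) (by simpa using h0)
      omega

lemma zeros2_set (v : List (List Int)) : ∀ (n : Nat) (nr : List Int), n < v.length →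
    zeros2 (v.set n nr) + (v.getD n []).count 0 = zeros2 v + nr.count 0 := by
  induction v with
  | nil => intro n nr h; simp at h
  | cons r v ih =>
    intro n nr h
    cases n with
    | zero => simp [zeros2]; omega
    | succ n =>
      simp only [List.set_cons_succ, zeros2, List.map_cons, List.sum_cons, List.getD_cons_succ]
      have := ih n nr (by simpa using h)
      simp only [zeros2] at this
      omega

lemma vget2_eq (v : List (List Int)) (x y : Int) (hx0 : 0 ≤ x) (hx : x.toNat < v.length)
    (hy0 : 0 ≤ y) (hy : y.toNat < (v.getD x.toNat []).length) :
    vget2 v x y = (v.getD x.toNat []).getD y.toNat 0 := by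
  unfold vget2
  rw [PySem.List.pyGetD_eq_getElem v [] hx0 (by omega)]
  rw [show v[x.toNat] = v.getD x.toNat [] from (List.getD_eq_getElem v [] hx).symm]
  rw [PySem.List.pyGetD_eq_getElem _ 0 hy0 (by omega)]
  exact (List.getD_eq_getElem _ 0 hy).symm

lemma vset2_eq (v : List (List Int)) (x y : Int) (hx0 : 0 ≤ x) (hx : x.toNat < v.length)
    (hy0 : 0 ≤ y) (_hy : y.toNat < (v.getD x.toNat []).length) :
    vset2 v x y 1 = v.set x.toNat ((v.getD x.toNat []).set y.toNat 1) := by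
  unfold vset2
  rw [PySem.List.pyGetD_eq_getElem v [] hx0 (by omega)]
  rw [PySem.List.pySetD_of_nonneg _ _ hy0, PySem.List.pySetD_of_nonneg _ _ hx0]
  rw [show v[x.toNat] = v.getD x.toNat [] from (List.getD_eq_getElem v [] hx).symm]

-- zero-count invariant used only for A's fuel
def InvZ (grid : List (List Int)) (K : Nat) (s : List (Int × Int) × List (List Int)) : Prop :=
  Sh grid s.2 ∧ zeros2 s.2 + s.1.length = K

lemma Sh_vset2 (grid v : List (List Int)) (q : Int × Int) (hsh : Sh grid v)
    (hq : inb grid q) : Sh grid (vset2 v q.1 q.2 1) := by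
  obtain ⟨hl, hr⟩ := hsh
  obtain ⟨h1, h2, h3, h4⟩ := hq
  have hx : q.1.toNat < v.length := by omega
  have hy : q.2.toNat < (v.getD q.1.toNat []).length := by
    have := hr q.1.toNat (by omega); omega
  rw [vset2_eq v q.1 q.2 h1 hx h3 hy]
  constructor
  · simpa using hl
  · intro i hi
    by_cases hix : i = q.1.toNat
    · subst hix
      rw [getD_set_self _ _ _ _ hx]
      simpa [List.length_set] using hr q.1.toNat hi
    · rw [getD_set_ne _ _ _ _ _ hix]
      exact hr i hi

lemma vget2_vset2 (grid v : List (List Int)) (q q' : Int × Int) (hsh : Sh grid v)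
    (hq : inb grid q) (hq' : inb grid q') :
    vget2 (vset2 v q.1 q.2 1) q'.1 q'.2 = if q' = q then 1 else vget2 v q'.1 q'.2 := by
  obtain ⟨hl, hr⟩ := hsh
  obtain ⟨h1, h2, h3, h4⟩ := hq
  obtain ⟨h1', h2', h3', h4'⟩ := hq'
  have hx : q.1.toNat < v.length := by omega
  have hy : q.2.toNat < (v.getD q.1.toNat []).length := by
    have := hr q.1.toNat (by omega); omega
  have hx' : q'.1.toNat < v.length := by omega
  have hy' : q'.2.toNat < (v.getD q'.1.toNat []).length := by
    have := hr q'.1.toNat (by omega); omega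
  rw [vset2_eq v q.1 q.2 h1 hx h3 hy]
  by_cases he : q' = q
  · subst he
    rw [if_pos rfl]
    rw [vget2_eq _ q'.1 q'.2 h1' (by simpa using hx') h3'
      (by rw [getD_set_self _ _ _ _ hx']; simpa [List.length_set] using hy')]
    rw [getD_set_self _ _ _ _ hx', getD_set_self _ _ _ _ hy']
  · rw [if_neg he]
    by_cases hxx : q'.1.toNat = q.1.toNat
    · have hyy : q'.2.toNat ≠ q.2.toNat := by
        intro hc
        apply he
        have e1 : q'.1 = q.1 := by omega
        have e2 : q'.2 = q.2 := by omega
        exact Prod.ext e1 e2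
      have hy'' : q'.2.toNat < (v.getD q.1.toNat []).length := hxx ▸ hy'
      rw [vget2_eq _ q'.1 q'.2 h1' (by simpa using hx') h3'
        (by rw [hxx, getD_set_self _ _ _ _ hx, List.length_set]; exact hy'')]
      rw [hxx, getD_set_self _ _ _ _ hx, getD_set_ne _ _ _ _ _ hyy]
      rw [vget2_eq v q'.1 q'.2 h1' hx' h3' hy', hxx]
    · rw [vget2_eq _ q'.1 q'.2 h1' (by simpa using hx') h3'
        (by rw [getD_set_ne _ _ _ _ _ hxx]; omega)]
      rw [getD_set_ne _ _ _ _ _ hxx]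
      rw [vget2_eq v q'.1 q'.2 h1' hx' h3' hy']

lemma bfsStep_inv (grid : List (List Int)) (r c : Int) (K : Nat)
    (s : List (Int × Int) × List (List Int)) (d : Int × Int) (h : InvZ grid K s) :
    InvZ grid K (bfsStep grid r c s d) := by
  obtain ⟨⟨hlen, hrow⟩, hz⟩ := h
  simp only [bfsStep]
  split_ifs with hg
  · obtain ⟨hx0, hx1, hy0, hy1, _, hv0⟩ := hg
    set x := r + d.1
    set y := c + d.2
    have hxN : x.toNat < grid.length := by omega
    have hxV : x.toNat < s.2.length := by omega
    have hrl : (grid.headD []).length ≤ (s.2.getD x.toNat []).length := hrow x.toNat hxN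
    have hyN : y.toNat < (s.2.getD x.toNat []).length := by omega
    have hget := vget2_eq s.2 x y hx0 hxV hy0 hyN
    have hset := vset2_eq s.2 x y hx0 hxV hy0 hyN
    rw [hget] at hv0
    constructor
    · constructor
      · simp [hset, hlen]
      · intro i hi
        rw [hset]
        by_cases hix : i = x.toNat
        · subst hix
          rw [getD_set_self _ _ _ _ hxV]
          simpa using hrow x.toNat hi
        · rw [getD_set_ne _ _ _ _ _ hix]
          exact hrow i hi
    · have hc := count_set_zero (s.2.getD x.toNat []) y.toNat hyN hv0
      have hzs := zeros2_set s.2 x.toNat ((s.2.getD x.toNat []).set y.toNat 1) hxV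
      simp only [hset]
      simp only [List.length_append, List.length_cons, List.length_nil]
      omega
  · exact ⟨⟨hlen, hrow⟩, hz⟩

lemma stepO_inv (grid : List (List Int)) (K : Nat) (s : List (Int × Int) × List (List Int))
    (p : Int × Int) (h : InvZ grid K s) :
    InvZ grid K (dxyA.foldl (bfsStep grid p.1 p.2) s) :=
  List.foldlRecOn _ _ h (fun b hb a _ => bfsStep_inv grid p.1 p.2 K b a hb)

-- ---- adjacency lemmas ----
lemma adj_of_dir (p : Int × Int) (d : Int × Int) (hd : d ∈ dxyA) :
    adj p (p.1 + d.1, p.2 + d.2) := by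
  fin_cases hd <;> simp [adj] <;> omega

lemma adj_cases (p q : Int × Int) (h : adj p q) :
    q = (p.1 + 0, p.2 + -1) ∨ q = (p.1 + 0, p.2 + 1) ∨ q = (p.1 + 1, p.2 + 0) ∨
      q = (p.1 + -1, p.2 + 0) := by
  obtain ⟨a, b⟩ := q
  simp only [adj] at h
  simp only [Prod.mk.injEq]
  omega

lemma adj_symm (p q : Int × Int) (h : adj p q) : adj q p := by
  simp only [adj] at h ⊢
  omega

-- the current value of an in-bounds cell, read through Core
lemma core_vcur (grid v0 : List (List Int)) (s0 : Int × Int) (M : List (Int × Int))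
    (v : List (List Int)) (hc : Core grid v0 s0 M v) (q : Int × Int) (hq : inb grid q) :
    vget2 v q.1 q.2 = 0 ↔ (vget2 v0 q.1 q.2 = 0 ∧ q ∉ M) := by
  obtain ⟨h1, h2, h3, h4, h5, h6, h7⟩ := hc
  constructor
  · intro h0
    have hnm : q ∉ M := by
      intro hm
      have := h7 q hm hq
      omega
    exact ⟨by rw [← h6 q hq hnm]; exact h0, hnm⟩
  · rintro ⟨hv0, hnm⟩
    rw [h6 q hq hnm]
    exact hv0

-- marking one fresh reachable cell preserves Core
lemma core_flip (grid v0 : List (List Int)) (s0 q : Int × Int) (M : List (Int × Int))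
    (v : List (List Int)) (hc : Core grid v0 s0 M v) (hq : inb grid q)
    (hg : vget2 grid q.1 q.2 = 1) (h0 : vget2 v q.1 q.2 = 0) (hr : Reach grid v0 s0 q) :
    Core grid v0 s0 (M ++ [q]) (vset2 v q.1 q.2 1) ∧ q ∉ M := by
  have hiff := core_vcur grid v0 s0 M v hc q hq
  obtain ⟨hv0, hnm⟩ := hiff.1 h0
  obtain ⟨h1, h2, h3, h4, h5, h6, h7⟩ := hc
  have helig : elig grid v0 q := ⟨hq, hg, hv0⟩
  refine ⟨⟨?_, ?_, ?_, ?_, ?_, ?_, ?_⟩, hnm⟩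
  · simp [List.nodup_append, h1]
    exact fun a b hab he => hnm (he ▸ hab)
  · exact List.mem_append_left _ h2
  · intro q' hq'
    rcases List.mem_append.1 hq' with h | h
    · exact h3 q' h
    · simp at h; subst h; exact Or.inr helig
  · intro q' hq'
    rcases List.mem_append.1 hq' with h | h
    · exact h4 q' h
    · simp at h; subst h; exact hr
  · exact Sh_vset2 grid v q h5 hq
  · intro q' hq'i hq'n
    have hne : q' ≠ q := by intro hcq; exact hq'n (by simp [hcq])
    have hnm' : q' ∉ M := fun hm => hq'n (List.mem_append_left _ hm)
    rw [vget2_vset2 grid v q q' h5 hq hq'i, if_neg hne]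
    exact h6 q' hq'i hnm'
  · intro q' hq'm hq'i
    rw [vget2_vset2 grid v q q' h5 hq hq'i]
    by_cases he : q' = q
    · rw [if_pos he]
    · rw [if_neg he]
      rcases List.mem_append.1 hq'm with h | h
      · exact h7 q' h hq'i
      · simp at h; exact absurd h he

-- a closed Core list contains the whole reach set
lemma closed_complete (grid v0 : List (List Int)) (s0 : Int × Int) (M : List (Int × Int))
    (v : List (List Int)) (hc : Core grid v0 s0 M v)
    (hcl : ∀ p ∈ M, ∀ q : Int × Int, adj p q → elig grid v0 q → q ∈ M) :
    ∀ q : Int × Int, Reach grid v0 s0 q → q ∈ M := by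
  intro q hr
  induction hr with
  | base => exact hc.2.1
  | step hp hadj helig ih => exact hcl _ ih _ hadj helig

-- two closed nodup lists have equal length
lemma clo_len (grid v0 : List (List Int)) (s0 : Int × Int) (M1 M2 : List (Int × Int))
    (h1 : IsClo grid v0 s0 M1) (h2 : IsClo grid v0 s0 M2) : M1.length = M2.length := by
  refine ((List.perm_ext_iff_of_nodup h1.1 h2.1).2 ?_).length_eq
  intro q
  rw [h1.2 q, h2.2 q]

-- ---- A side ----
lemma bfsStep_spec (grid v0 : List (List Int)) (s0 p : Int × Int) (P' acc : List (Int × Int))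
    (v : List (List Int)) (d : Int × Int) (hd : d ∈ dxyA) (hp : p ∈ P')
    (hc : Core grid v0 s0 (P' ++ acc) v) :
    Core grid v0 s0 (P' ++ (bfsStep grid p.1 p.2 (acc, v) d).1)
      (bfsStep grid p.1 p.2 (acc, v) d).2 ∧
    acc ⊆ (bfsStep grid p.1 p.2 (acc, v) d).1 ∧
    (elig grid v0 (p.1 + d.1, p.2 + d.2) →
      (p.1 + d.1, p.2 + d.2) ∈ P' ++ (bfsStep grid p.1 p.2 (acc, v) d).1) := by
  have hadj : adj p (p.1 + d.1, p.2 + d.2) := adj_of_dir p d hd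
  simp only [bfsStep]
  split_ifs with hg
  · obtain ⟨hx0, hx1, hy0, hy1, hg1, hv0⟩ := hg
    have hq : inb grid (p.1 + d.1, p.2 + d.2) := ⟨hx0, hx1, hy0, hy1⟩
    have hr : Reach grid v0 s0 (p.1 + d.1, p.2 + d.2) := by
      refine Reach.step (hc.2.2.2.1 p (List.mem_append_left _ hp)) hadj ?_
      have hiff := core_vcur grid v0 s0 (P' ++ acc) v hc _ hq
      exact ⟨hq, hg1, (hiff.1 hv0).1⟩
    have := core_flip grid v0 s0 (p.1 + d.1, p.2 + d.2) (P' ++ acc) v hc hq hg1 hv0 hr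
    refine ⟨by rw [← List.append_assoc]; exact this.1, ?_, ?_⟩
    · intro a ha; exact List.mem_append_left _ ha
    · intro _
      simp
  · refine ⟨hc, fun a ha => ha, ?_⟩
    intro helig
    obtain ⟨hq, hg1, hv00⟩ := helig
    obtain ⟨hx0, hx1, hy0, hy1⟩ := hq
    have hvc : ¬ vget2 v (p.1 + d.1) (p.2 + d.2) = 0 := by
      intro h0
      exact hg ⟨hx0, hx1, hy0, hy1, hg1, h0⟩
    have hiff := core_vcur grid v0 s0 (P' ++ acc) v hc (p.1 + d.1, p.2 + d.2)
      ⟨hx0, hx1, hy0, hy1⟩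
    by_contra hnm
    exact hvc (hiff.2 ⟨hv00, hnm⟩)

lemma stepO_spec (grid v0 : List (List Int)) (s0 p : Int × Int) (P' rest : List (Int × Int))
    (v : List (List Int)) (hp : p ∈ P') (hc : Core grid v0 s0 (P' ++ rest) v) :
    Core grid v0 s0 (P' ++ (dxyA.foldl (bfsStep grid p.1 p.2) (rest, v)).1)
      (dxyA.foldl (bfsStep grid p.1 p.2) (rest, v)).2 ∧
    rest ⊆ (dxyA.foldl (bfsStep grid p.1 p.2) (rest, v)).1 ∧
    (∀ q : Int × Int, adj p q → elig grid v0 q →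
      q ∈ P' ++ (dxyA.foldl (bfsStep grid p.1 p.2) (rest, v)).1) := by
  have hd1 : ((0 : Int), (-1 : Int)) ∈ dxyA := by simp [dxyA]
  have hd2 : ((0 : Int), (1 : Int)) ∈ dxyA := by simp [dxyA]
  have hd3 : ((1 : Int), (0 : Int)) ∈ dxyA := by simp [dxyA]
  have hd4 : ((-1 : Int), (0 : Int)) ∈ dxyA := by simp [dxyA]
  set s1 := bfsStep grid p.1 p.2 (rest, v) (0, -1) with hs1
  set s2 := bfsStep grid p.1 p.2 s1 (0, 1) with hs2
  set s3 := bfsStep grid p.1 p.2 s2 (1, 0) with hs3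
  set s4 := bfsStep grid p.1 p.2 s3 (-1, 0) with hs4
  have hfold : dxyA.foldl (bfsStep grid p.1 p.2) (rest, v) = s4 := by
    simp only [dxyA, List.foldl_cons, List.foldl_nil, hs1, hs2, hs3, hs4]
  obtain ⟨c1, m1, e1⟩ := bfsStep_spec grid v0 s0 p P' rest v (0, -1) hd1 hp hc
  rw [← hs1] at c1 m1 e1
  obtain ⟨c2, m2, e2⟩ := bfsStep_spec grid v0 s0 p P' s1.1 s1.2 (0, 1) hd2 hp c1
  rw [← hs2] at c2 m2 e2
  obtain ⟨c3, m3, e3⟩ := bfsStep_spec grid v0 s0 p P' s2.1 s2.2 (1, 0) hd3 hp c2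
  rw [← hs3] at c3 m3 e3
  obtain ⟨c4, m4, e4⟩ := bfsStep_spec grid v0 s0 p P' s3.1 s3.2 (-1, 0) hd4 hp c3
  rw [← hs4] at c4 m4 e4
  have hmono12 : s1.1 ⊆ s4.1 := fun a ha => m4 (m3 (m2 ha))
  have hmono2 : s2.1 ⊆ s4.1 := fun a ha => m4 (m3 ha)
  have hmono3 : s3.1 ⊆ s4.1 := m4
  have hkeep : ∀ q : Int × Int, ∀ L : List (Int × Int), L ⊆ s4.1 → q ∈ P' ++ L →
      q ∈ P' ++ s4.1 := by
    intro q L hL hq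
    rcases List.mem_append.1 hq with h | h
    · exact List.mem_append_left _ h
    · exact List.mem_append_right _ (hL h)
  rw [hfold]
  refine ⟨c4, fun a ha => hmono12 (m1 ha), ?_⟩
  intro q hadj helig
  rcases adj_cases p q hadj with hq | hq | hq | hq
  · subst hq; exact hkeep _ s1.1 hmono12 (e1 helig)
  · subst hq; exact hkeep _ s2.1 hmono2 (e2 helig)
  · subst hq; exact hkeep _ s3.1 hmono3 (e3 helig)
  · subst hq; exact hkeep _ s4.1 (fun a ha => ha) (e4 helig)

lemma bfsA_main (grid v0 : List (List Int)) (s0 : Int × Int) :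
    ∀ (fuel : Nat) (P Q : List (Int × Int)) (v : List (List Int)) (area : Int),
      Core grid v0 s0 (P ++ Q) v →
      (∀ p ∈ P, ∀ q : Int × Int, adj p q → elig grid v0 q → q ∈ P ++ Q) →
      zeros2 v + Q.length ≤ fuel →
      ∃ M : List (Int × Int), IsClo grid v0 s0 M ∧
        bfsLoop grid fuel Q v area = area + ((M.length : Int) - (P.length : Int)) := by
  intro fuel
  induction fuel with
  | zero =>
    intro P Q v area hc hf hfuel
    cases Q with
    | nil =>
      refine ⟨P, ⟨by simpa using hc.1, ?_⟩, by simp [bfsLoop]⟩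
      intro q
      constructor
      · intro hq; exact hc.2.2.2.1 q (by simpa using hq)
      · intro hr
        have := closed_complete grid v0 s0 (P ++ []) v hc (by simpa using hf) q hr
        simpa using this
    | cons p rest => simp at hfuel
  | succ fuel ih =>
    intro P Q v area hc hf hfuel
    cases Q with
    | nil =>
      refine ⟨P, ⟨by simpa using hc.1, ?_⟩, by simp [bfsLoop]⟩
      intro q
      constructor
      · intro hq; exact hc.2.2.2.1 q (by simpa using hq)
      · intro hr
        have := closed_complete grid v0 s0 (P ++ []) v hc (by simpa using hf) q hr
        simpa using this
    | cons p rest =>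
      have hc' : Core grid v0 s0 ((P ++ [p]) ++ rest) v := by
        rw [List.append_assoc]; simpa using hc
      have hp : p ∈ P ++ [p] := by simp
      obtain ⟨c4, m4, cov⟩ := stepO_spec grid v0 s0 p (P ++ [p]) rest v hp hc'
      set s' := dxyA.foldl (bfsStep grid p.1 p.2) (rest, v) with hs'
      have hfront : ∀ p0 ∈ P ++ [p], ∀ q : Int × Int, adj p0 q → elig grid v0 q →
          q ∈ (P ++ [p]) ++ s'.1 := by
        intro p0 hp0 q hadj helig
        rcases List.mem_append.1 hp0 with h | h
        · have := hf p0 h q hadj helig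
          rcases List.mem_append.1 this with h2 | h2
          · exact List.mem_append_left _ (List.mem_append_left _ h2)
          · rcases List.mem_cons.1 h2 with h3 | h3
            · exact List.mem_append_left _ (by simp [h3])
            · exact List.mem_append_right _ (m4 h3)
        · simp at h; subst h; exact cov q hadj helig
      have hz : InvZ grid (zeros2 v + rest.length) (rest, v) := ⟨hc.2.2.2.2.1, rfl⟩
      have hz' := stepO_inv grid (zeros2 v + rest.length) (rest, v) p hz
      rw [← hs'] at hz'
      have hfuel' : zeros2 s'.2 + s'.1.length ≤ fuel := by
        have := hz'.2
        simp only [List.length_cons] at hfuel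
        omega
      obtain ⟨M, hclo, hval⟩ := ih (P ++ [p]) s'.1 s'.2 (area + 1) c4 hfront hfuel'
      refine ⟨M, hclo, ?_⟩
      have hloop : bfsLoop grid (fuel + 1) (p :: rest) v area =
          bfsLoop grid fuel s'.1 s'.2 (area + 1) := rfl
      rw [hloop, hval]
      simp only [List.length_append, List.length_cons, List.length_nil]
      push_cast
      ring

-- ---- B side ----
def CondB (grid v : List (List Int)) (M : List (Int × Int)) (x y : Int) : Prop :=
  vget2 grid x y = 1 ∧ vget2 v x y = 0 ∧
  ((x - 1, y) ∈ M ∨ (x + 1, y) ∈ M ∨ (x, y - 1) ∈ M ∨ (x, y + 1) ∈ M)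

lemma cellB_pos (grid : List (List Int)) (x y : Int)
    (st : List (List Int) × List (Int × Int) × Bool) (h : CondB grid st.1 st.2.1 x y) :
    cellB grid x y st = (vset2 st.1 x y 1, PySem.Set.add st.2.1 (x, y), true) := by
  unfold CondB at h
  simp only [cellB]
  rw [if_pos h]

lemma cellB_neg (grid : List (List Int)) (x y : Int)
    (st : List (List Int) × List (Int × Int) × Bool) (h : ¬ CondB grid st.1 st.2.1 x y) :
    cellB grid x y st = st := by
  unfold CondB at h
  simp only [cellB]
  rw [if_neg h]

lemma set_add_fresh (M : List (Int × Int)) (q : Int × Int) (h : q ∉ M) :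
    PySem.Set.add M q = M ++ [q] := by
  simp [PySem.Set.add, PySem.Set.contains, h]

def cellsL (R C : Nat) : List (Nat × Nat) :=
  (List.range R).flatMap (fun x => (List.range C).map (fun y => (x, y)))

def foldCells (grid : List (List Int)) (L : List (Nat × Nat))
    (st : List (List Int) × List (Int × Int) × Bool) :
    List (List Int) × List (Int × Int) × Bool :=
  L.foldl (fun st2 c => cellB grid (c.1 : Int) (c.2 : Int) st2) st

lemma sweepB_eq (grid : List (List Int)) (R C : Nat)
    (st : List (List Int) × List (Int × Int) × Bool) :
    sweepB grid R C st = foldCells grid (cellsL R C) st := by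
  simp [sweepB, foldCells, cellsL, List.foldl_flatMap, List.foldl_map]

lemma cellsL_eq_product (R C : Nat) : cellsL R C = (List.range R) ×ˢ (List.range C) := rfl

lemma mem_cellsL (R C : Nat) (c : Nat × Nat) :
    c ∈ cellsL R C ↔ c.1 < R ∧ c.2 < C := by
  obtain ⟨a, b⟩ := c
  rw [cellsL_eq_product]
  simp

lemma length_cellsL (R C : Nat) : (cellsL R C).length = R * C := by
  rw [cellsL_eq_product]
  simp [List.length_product]

lemma nodup_cellsL (R C : Nat) : (cellsL R C).Nodup := by
  rw [cellsL_eq_product]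
  exact (List.nodup_range).product (List.nodup_range)

-- one cell step: Core preserved, marked monotone, changed monotone, no-change reflection
lemma cellB_spec (grid v0 : List (List Int)) (s0 : Int × Int) (x y : Int)
    (hin : inb grid (x, y)) (st : List (List Int) × List (Int × Int) × Bool)
    (hc : Core grid v0 s0 st.2.1 st.1) :
    Core grid v0 s0 (cellB grid x y st).2.1 (cellB grid x y st).1 ∧
    st.2.1 ⊆ (cellB grid x y st).2.1 ∧
    st.2.1.length ≤ (cellB grid x y st).2.1.length ∧
    ((cellB grid x y st).2.2 = true → st.2.2 = true ∨
      (cellB grid x y st).2.1.length = st.2.1.length + 1) ∧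
    ((cellB grid x y st).2.2 = false →
      cellB grid x y st = st ∧ ¬ CondB grid st.1 st.2.1 x y) := by
  by_cases hg : CondB grid st.1 st.2.1 x y
  · obtain ⟨hg1, hg0, hnb⟩ := hg
    have hr : Reach grid v0 s0 (x, y) := by
      have hv0 : vget2 v0 x y = 0 :=
        ((core_vcur grid v0 s0 st.2.1 st.1 hc (x, y) hin).1 hg0).1
      have helig : elig grid v0 (x, y) := ⟨hin, hg1, hv0⟩
      rcases hnb with h | h | h | h
      · exact Reach.step (hc.2.2.2.1 _ h) (by simp [adj]) helig
      · exact Reach.step (hc.2.2.2.1 _ h) (by simp [adj]) helig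
      · exact Reach.step (hc.2.2.2.1 _ h) (by simp [adj]) helig
      · exact Reach.step (hc.2.2.2.1 _ h) (by simp [adj]) helig
    obtain ⟨hcore, hnm⟩ := core_flip grid v0 s0 (x, y) st.2.1 st.1 hc hin hg1 hg0 hr
    rw [cellB_pos grid x y st ⟨hg1, hg0, hnb⟩, set_add_fresh st.2.1 (x, y) hnm]
    refine ⟨hcore, ?_, by simp, fun _ => Or.inr (by simp), by simp⟩
    intro a ha; exact List.mem_append_left _ ha
  · rw [cellB_neg grid x y st hg]
    exact ⟨hc, fun a ha => ha, le_refl _, fun h => Or.inl h, fun _ => ⟨rfl, hg⟩⟩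

-- fold over a list of in-bounds cells: Core and monotonicity
lemma foldCells_spec (grid v0 : List (List Int)) (s0 : Int × Int) :
    ∀ (L : List (Nat × Nat)) (st : List (List Int) × List (Int × Int) × Bool),
      (∀ c ∈ L, inb grid ((c.1 : Int), (c.2 : Int))) →
      Core grid v0 s0 st.2.1 st.1 →
      Core grid v0 s0 (foldCells grid L st).2.1 (foldCells grid L st).1 ∧
      st.2.1 ⊆ (foldCells grid L st).2.1 ∧
      st.2.1.length ≤ (foldCells grid L st).2.1.length := by
  intro L
  induction L with
  | nil => intro st _ hc; exact ⟨hc, fun a ha => ha, le_refl _⟩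
  | cons c L ih =>
    intro st hin hc
    have hc1 := cellB_spec grid v0 s0 (c.1 : Int) (c.2 : Int)
      (hin c (by simp)) st hc
    have hrest := ih (cellB grid (c.1 : Int) (c.2 : Int) st)
      (fun c' hc' => hin c' (by simp [hc'])) hc1.1
    refine ⟨hrest.1, ?_, le_trans hc1.2.2.1 hrest.2.2⟩
    intro a ha
    exact hrest.2.1 (hc1.2.1 ha)

-- a sweep that reports no change did nothing, and every cell's condition is false
lemma foldCells_false (grid : List (List Int)) :
    ∀ (L : List (Nat × Nat)) (st : List (List Int) × List (Int × Int) × Bool),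
      (foldCells grid L st).2.2 = false →
      foldCells grid L st = st ∧ ∀ c ∈ L, ¬ CondB grid st.1 st.2.1 (c.1 : Int) (c.2 : Int) := by
  intro L
  induction L with
  | nil => intro st _; exact ⟨rfl, by simp⟩
  | cons c L ih =>
    intro st hfalse
    have hstep : foldCells grid (c :: L) st =
        foldCells grid L (cellB grid (c.1 : Int) (c.2 : Int) st) := rfl
    rw [hstep] at hfalse
    obtain ⟨heq, hconds⟩ := ih _ hfalse
    have hch : (cellB grid (c.1 : Int) (c.2 : Int) st).2.2 = false := by
      by_contra hne
      have htrue : (cellB grid (c.1 : Int) (c.2 : Int) st).2.2 = true := by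
        cases h : (cellB grid (c.1 : Int) (c.2 : Int) st).2.2
        · exact absurd h hne
        · rfl
      -- changed is monotone along the fold
      have : (foldCells grid L (cellB grid (c.1 : Int) (c.2 : Int) st)).2.2 = true := by
        rw [heq]; exact htrue
      rw [hfalse] at this; exact absurd this (by simp)
    have hcell : cellB grid (c.1 : Int) (c.2 : Int) st = st ∧
        ¬ CondB grid st.1 st.2.1 (c.1 : Int) (c.2 : Int) := by
      by_cases hg : CondB grid st.1 st.2.1 (c.1 : Int) (c.2 : Int)
      · rw [cellB_pos grid _ _ st hg] at hch
        simp at hch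
      · exact ⟨cellB_neg grid _ _ st hg, hg⟩
    refine ⟨by rw [hstep, heq]; exact hcell.1, ?_⟩
    intro c' hc'
    rcases List.mem_cons.1 hc' with h | h
    · subst h; exact hcell.2
    · have := hconds c' h
      rw [hcell.1] at this
      exact this
  
-- a sweep that reports a change strictly grew the marked list
lemma foldCells_growth (grid : List (List Int)) (v0 : List (List Int)) (s0 : Int × Int) :
    ∀ (L : List (Nat × Nat)) (st : List (List Int) × List (Int × Int) × Bool),
      (∀ c ∈ L, inb grid ((c.1 : Int), (c.2 : Int))) →
      Core grid v0 s0 st.2.1 st.1 →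
      st.2.2 = false → (foldCells grid L st).2.2 = true →
      st.2.1.length < (foldCells grid L st).2.1.length := by
  intro L
  induction L with
  | nil =>
    intro st _ _ h0 h1
    rw [show foldCells grid [] st = st from rfl] at h1
    rw [h0] at h1
    simp at h1
  | cons c L ih =>
    intro st hin hc h0 h1
    have hstep : foldCells grid (c :: L) st =
        foldCells grid L (cellB grid (c.1 : Int) (c.2 : Int) st) := rfl
    rw [hstep] at h1 ⊢
    have hcs := cellB_spec grid v0 s0 (c.1 : Int) (c.2 : Int) (hin c (by simp)) st hc
    cases hch : (cellB grid (c.1 : Int) (c.2 : Int) st).2.2 with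
    | true =>
      rcases hcs.2.2.2.1 hch with h | h
      · rw [h0] at h; simp at h
      · have hmono := (foldCells_spec grid v0 s0 L (cellB grid (c.1 : Int) (c.2 : Int) st)
          (fun c' hc' => hin c' (by simp [hc'])) hcs.1).2.2
        omega
    | false =>
      obtain ⟨heq, _⟩ := hcs.2.2.2.2 hch
      rw [heq] at h1 ⊢
      exact ih st (fun c' hc' => hin c' (List.mem_cons_of_mem _ hc')) hc h0 h1

-- all sweep conditions false ⇒ the marked list is closed
lemma conds_false_closed (grid v0 : List (List Int)) (s0 : Int × Int)
    (M : List (Int × Int)) (v : List (List Int)) (hc : Core grid v0 s0 M v)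
    (hconds : ∀ c ∈ cellsL grid.length (grid.headD []).length,
      ¬ CondB grid v M (c.1 : Int) (c.2 : Int)) :
    ∀ p ∈ M, ∀ q : Int × Int, adj p q → elig grid v0 q → q ∈ M := by
  intro p hp q hadj helig
  by_contra hnm
  obtain ⟨hq, hg1, hv0⟩ := helig
  have hcell : (q.1.toNat, q.2.toNat) ∈ cellsL grid.length (grid.headD []).length := by
    rw [mem_cellsL]
    obtain ⟨a1, a2, a3, a4⟩ := hq
    show q.1.toNat < grid.length ∧ q.2.toNat < (grid.headD []).length
    omega
  apply hconds (q.1.toNat, q.2.toNat) hcell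
  have hvc : vget2 v q.1 q.2 = 0 :=
    (core_vcur grid v0 s0 M v hc q hq).2 ⟨hv0, hnm⟩
  have hpadj := adj_symm p q hadj
  have hpmem : (q.1 - 1, q.2) ∈ M ∨ (q.1 + 1, q.2) ∈ M ∨ (q.1, q.2 - 1) ∈ M ∨
      (q.1, q.2 + 1) ∈ M := by
    rcases adj_cases q p hpadj with h | h | h | h
    · right; right; left
      rw [show (q.1, q.2 - 1) = p from by rw [h]; exact Prod.ext_iff.2 ⟨by ring, by ring⟩]
      exact hp
    · right; right; right
      rw [show (q.1, q.2 + 1) = p from by rw [h]; exact Prod.ext_iff.2 ⟨by ring, by ring⟩]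
      exact hp
    · right; left
      rw [show (q.1 + 1, q.2) = p from by rw [h]; exact Prod.ext_iff.2 ⟨by ring, by ring⟩]
      exact hp
    · left
      rw [show (q.1 - 1, q.2) = p from by rw [h]; exact Prod.ext_iff.2 ⟨by ring, by ring⟩]
      exact hp
  show CondB grid v M ((q.1.toNat : Int)) ((q.2.toNat : Int))
  have h1 : ((q.1.toNat : Int)) = q.1 := by obtain ⟨a1, _, _, _⟩ := hq; omega
  have h2 : ((q.2.toNat : Int)) = q.2 := by obtain ⟨_, _, a3, _⟩ := hq; omega
  rw [h1, h2]
  exact ⟨hg1, hvc, hpmem⟩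

-- cardinality bound: a Core list has at most rows*cols + 1 members
lemma core_card (grid v0 : List (List Int)) (s0 : Int × Int) (M : List (Int × Int))
    (v : List (List Int)) (hc : Core grid v0 s0 M v) :
    M.length ≤ grid.length * (grid.headD []).length + 1 ∧
    (grid.length * (grid.headD []).length + 1 ≤ M.length →
      ∀ q : Int × Int, inb grid q → q ∈ M) := by
  set R := grid.length
  set C := (grid.headD []).length
  set cellsI : List (Int × Int) :=
    (cellsL R C).map (fun c => ((c.1 : Int), (c.2 : Int))) with hcI
  have hnodupI : cellsI.Nodup := by
    refine (nodup_cellsL R C).map ?_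
    intro a b h
    obtain ⟨a1, a2⟩ := a; obtain ⟨b1, b2⟩ := b
    simp at h ⊢
    omega
  have hsub : M ⊆ s0 :: cellsI := by
    intro q hq
    rcases hc.2.2.1 q hq with h | h
    · simp [h]
    · obtain ⟨⟨a1, a2, a3, a4⟩, _, _⟩ := h
      refine List.mem_cons_of_mem _ (List.mem_map.2 ⟨(q.1.toNat, q.2.toNat), ?_, ?_⟩)
      · rw [mem_cellsL]
        show q.1.toNat < grid.length ∧ q.2.toNat < (grid.headD []).length
        omega
      · obtain ⟨qa, qb⟩ := q; simp at a1 a3 ⊢; omega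
  have hsp := List.subperm_of_subset hc.1 hsub
  have hlenI : cellsI.length = R * C := by rw [hcI, List.length_map, length_cellsL]
  have hlen := hsp.length_le
  rw [List.length_cons, hlenI] at hlen
  refine ⟨hlen, ?_⟩
  intro hge q hq
  have hperm := List.Subperm.perm_of_length_le hsp
    (by rw [List.length_cons, hlenI]; omega)
  have hqI : q ∈ cellsI := by
    obtain ⟨a1, a2, a3, a4⟩ := hq
    refine List.mem_map.2 ⟨(q.1.toNat, q.2.toNat), ?_, ?_⟩
    · rw [mem_cellsL]
      show q.1.toNat < grid.length ∧ q.2.toNat < (grid.headD []).length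
      omega
    · obtain ⟨qa, qb⟩ := q; simp at a1 a3 ⊢; omega
  exact hperm.mem_iff.2 (by simp [hqI])

lemma fixB_main (grid v0 : List (List Int)) (s0 : Int × Int) :
    ∀ (fuel : Nat) (v : List (List Int)) (M : List (Int × Int)),
      Core grid v0 s0 M v →
      grid.length * (grid.headD []).length + 1 ≤ fuel + M.length →
      ∃ Mf : List (Int × Int), IsClo grid v0 s0 Mf ∧
        fixB grid grid.length (grid.headD []).length fuel v M = (Mf.length : Int) := by
  intro fuel
  induction fuel with
  | zero =>
    intro v M hc hb
    have hcard := core_card grid v0 s0 M v hc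
    have hfull := hcard.2 (by omega)
    refine ⟨M, ⟨hc.1, ?_⟩, rfl⟩
    intro q
    constructor
    · intro hq; exact hc.2.2.2.1 q hq
    · intro hr
      refine closed_complete grid v0 s0 M v hc ?_ q hr
      intro p _ q' _ helig
      exact hfull q' helig.1
  | succ fuel ih =>
    intro v M hc hb
    have hinb : ∀ c ∈ cellsL grid.length (grid.headD []).length,
        inb grid ((c.1 : Int), (c.2 : Int)) := by
      intro c hcm
      rw [mem_cellsL] at hcm
      show (0:Int) ≤ (c.1:Int) ∧ (c.1:Int) < (grid.length:Int) ∧ (0:Int) ≤ (c.2:Int) ∧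
        (c.2:Int) < ((grid.headD []).length:Int)
      omega
    have hfix : fixB grid grid.length (grid.headD []).length (fuel + 1) v M =
        (if (sweepB grid grid.length (grid.headD []).length (v, M, false)).2.2 then
          fixB grid grid.length (grid.headD []).length fuel
            (sweepB grid grid.length (grid.headD []).length (v, M, false)).1
            (sweepB grid grid.length (grid.headD []).length (v, M, false)).2.1
        else ((sweepB grid grid.length (grid.headD []).length (v, M, false)).2.1.length : Int)) := rfl
    rw [hfix, sweepB_eq]
    set st := foldCells grid (cellsL grid.length (grid.headD []).length) (v, M, false) with hst
    cases hch : st.2.2 with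
    | false =>
      obtain ⟨heq, hconds⟩ := foldCells_false grid _ (v, M, false) (by rw [← hst]; exact hch)
      rw [← hst] at heq
      have hclosed := conds_false_closed grid v0 s0 M v hc (by
        intro c hcm
        have := hconds c hcm
        simpa using this)
      refine ⟨M, ⟨hc.1, ?_⟩, ?_⟩
      · intro q
        constructor
        · intro hq; exact hc.2.2.2.1 q hq
        · exact fun hr => closed_complete grid v0 s0 M v hc hclosed q hr
      · simp only [Bool.false_eq_true, if_false]
        rw [heq]
    | true =>
      have hcs := foldCells_spec grid v0 s0 (cellsL grid.length (grid.headD []).length)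
        (v, M, false) hinb hc
      rw [← hst] at hcs
      have hgrow := foldCells_growth grid v0 s0 (cellsL grid.length (grid.headD []).length)
        (v, M, false) hinb hc rfl (by rw [← hst]; exact hch)
      rw [← hst] at hgrow
      simp only [if_true]
      refine ih st.1 st.2.1 hcs.1 ?_
      have hg2 : M.length < st.2.1.length := hgrow
      omega

-- ===== VERDICT (by name: the statement is the Claim_ definition above) =====
theorem get_max_area_spec : Claim_equal_get_max_area := by
  intro visited grid row col hDom hPre
  obtain ⟨hgr, hlen, hvr, hrowIn, hcolIn⟩ := hPre
  unfold Spec_get_max_area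
  simp only [get_max_area, get_max_area_alt]
  have hcols : (if grid.isEmpty then 0 else (grid.headD []).length) = (grid.headD []).length := by
    cases grid <;> simp
  rw [hcols]
  rw [show PySem.Set.ofList [(row, col)] = [(row, col)] from rfl]
  set v1 := vset2 visited row col 1 with hv1
  -- shape of the (marked) visited matrix
  obtain ⟨j, hj, hsetj, hgetj⟩ := inRange_norm visited row hrowIn
  have hv1e : v1 = visited.set j (PySem.List.pySetD (PySem.List.pyGetD visited row []) col 1) := by
    rw [hv1]; unfold vset2; rw [hsetj]
  have hnrlen : (PySem.List.pySetD (PySem.List.pyGetD visited row []) col 1).length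
      = (visited.getD j []).length := by
    rw [PySem.List.length_pySetD, hgetj]
  have hSh : Sh grid v1 := by
    rw [hv1e]
    constructor
    · simpa using hlen
    · intro i hi
      by_cases hij : i = j
      · subst hij
        rw [getD_set_self _ _ _ _ hj, hnrlen]
        exact hvr _ hi
      · rw [getD_set_ne _ _ _ _ _ hij]
        exact hvr i hi
  -- the start cell reads 1 in v1 whenever it is in bounds
  have hstart : inb grid (row, col) → vget2 v1 row col = 1 := by
    intro hinb
    have hShv : Sh grid visited := ⟨hlen, hvr⟩
    have := vget2_vset2 grid visited (row, col) (row, col) hShv hinb hinb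
    simpa [hv1] using this
  have core0 : Core grid v1 (row, col) [(row, col)] v1 := by
    refine ⟨List.nodup_singleton _, by simp, ?_, ?_, hSh, ?_, ?_⟩
    · intro q hq; exact Or.inl (by simpa using hq)
    · intro q hq
      have : q = (row, col) := by simpa using hq
      subst this; exact Reach.base
    · intro q _ _; rfl
    · intro q hqm hqi
      have : q = (row, col) := by simpa using hqm
      subst this
      exact hstart hqi
  obtain ⟨MA, hcloA, hvalA⟩ := bfsA_main grid v1 (row, col) (zeros2 v1 + 1)
    [] [(row, col)] v1 0 (by simpa using core0) (by simp) (by simp)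
  obtain ⟨MB, hcloB, hvalB⟩ := fixB_main grid v1 (row, col)
    (grid.length * (grid.headD []).length + 1) v1 [(row, col)] core0 (by omega)
  have hle : MA.length = MB.length := clo_len grid v1 (row, col) MA MB hcloA hcloB
  rw [hvalA, hvalB, hle]
  simp
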